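-- pv_equiv track=rewrite | github.com/enry86/NewSearch | verba/verbs_finder.py | select_sent
-- ===== SOURCE A (Python) =====
-- def select_sent (text, pos):
--     base = 0
--     ent = 0
--     res = []
--     while base < len(text):
--         ent_l = []
--         sent, n_base = isolate_sent(text[base:], base)
--         while ent < len(pos) and pos[ent][0][0] < n_base:
--             ent_l.append(pos[ent])
--             ent += 1
--         if ent_l != []:
--             node = (sent, (base, n_base), ent_l)
--             res.append(node)
--         base = n_base + 1
--     return res
--
-- def isolate_sent (text, base):
--     dot = text.find('.')
--     res = None
--     while dot < 100 and res == None: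
--         if dot == -1:
--             res = text
--         else:
--             dot = text.find('.', dot + 1)
--     if res == None:
--         res = text[:dot + 1]
--     return res, base + len(res)
-- ===== SOURCE B (Python) =====
-- def select_sent(text, pos):
--     # Phase 1: compute all sentence spans in one pass.
--     # A sentence ends at the first '.' at offset >= base+100 (inclusive),
--     # or at the end of the text if there is none.
--     spans = []
--     base = 0
--     n = len(text)
--     while base < n:
--         dot = text.find('.', base + 100)
--         end = n if dot == -1 else dot + 1
--         spans.append((text[base:end], base, end))
--         base = end + 1
--     # Phase 2: sweep the entity list once with an index pointer,
--     # attaching to each span the entities starting before its end.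
--     res = []
--     i = 0
--     for sent, b, e in spans:
--         j = i
--         while j < len(pos) and pos[j][0][0] < e:
--             j += 1
--         if i < j:
--             res.append((sent, (b, e), pos[i:j]))
--         i = j
--     return res
-- ===== Notes on version B (the rewrite author's own statement) =====
-- stated objective: simpler
-- what changed: A interleaves sentence isolation (a dot-skipping helper with a while loop re-finding '.' repeatedly) with entity attachment in one loop; B first computes all sentence spans with a single text.find('.', base+100) per sentence, then sweeps the entity list once over the precomputed spans.
import Mathlib
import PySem

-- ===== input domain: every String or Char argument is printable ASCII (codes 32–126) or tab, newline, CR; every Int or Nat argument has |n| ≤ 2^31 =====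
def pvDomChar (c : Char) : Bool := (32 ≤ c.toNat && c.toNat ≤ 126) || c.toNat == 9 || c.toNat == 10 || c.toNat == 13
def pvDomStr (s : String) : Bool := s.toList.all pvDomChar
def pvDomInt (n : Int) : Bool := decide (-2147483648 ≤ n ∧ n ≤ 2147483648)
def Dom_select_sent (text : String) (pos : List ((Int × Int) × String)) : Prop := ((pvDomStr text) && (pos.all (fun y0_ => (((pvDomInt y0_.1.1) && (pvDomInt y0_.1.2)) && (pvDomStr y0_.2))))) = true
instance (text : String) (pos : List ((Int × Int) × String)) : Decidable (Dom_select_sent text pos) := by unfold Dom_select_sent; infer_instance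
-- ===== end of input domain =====

-- B splits A's single interleaved loop into two passes: first all sentence spans
-- (one find('.', base+100) per sentence instead of A's helper that re-finds every dot),
-- then one sweep attaching entities to the precomputed spans. Objective: simpler.

-- ===== PORT A =====
-- isolate_sent's inner while loop: res is the Option, dot the running find result
-- (fuel only makes the recursion total; it is never exhausted on the call below)
def pvIsolLoop (t : List Char) (dot : Int) : Nat → Int × Option (List Char)
  | 0 => (dot, none)
  | fuel+1 =>
    if dot < 100 then
      if dot = -1 then (dot, some t)
      else pvIsolLoop t (PySem.Chars.findFrom t ['.'] (dot+1)) fuel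
    else (dot, none)

-- isolate_sent (text, base) on code points
def pvIsolate (t : List Char) (base : Int) : List Char × Int :=
  let p := pvIsolLoop t (PySem.Chars.find t ['.']) (t.length + 2)
  let res := match p.2 with
    | some r => r
    | none => PySem.List.slice t none (some (p.1 + 1))   -- text[:dot + 1]
  (res, base + (res.length : Int))

-- the inner 'while ent < len(pos) and pos[ent][0][0] < n_base' loop: (ent_l, new ent)
def pvCollect (pos : List ((Int × Int) × String)) (nbase : Int) (ent : Nat) :
    List ((Int × Int) × String) × Nat :=
  if h : ent < pos.length then
    if pos[ent].1.1 < nbase then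
      let q := pvCollect pos nbase (ent + 1)
      (pos[ent] :: q.1, q.2)
    else ([], ent)
  else ([], ent)
  termination_by pos.length - ent

-- the outer 'while base < len(text)' loop (fuel = len(text)+1 suffices: base grows each turn)
def pvSelLoop (s : List Char) (pos : List ((Int × Int) × String)) (base : Int) (ent : Nat) :
    Nat → List (String × (Int × Int) × (List ((Int × Int) × String)))
  | 0 => []
  | fuel+1 =>
    if base < (s.length : Int) then
      let pr := pvIsolate (PySem.List.slice s (some base) none) base   -- text[base:]
      let ce := pvCollect pos pr.2 ent
      let rest := pvSelLoop s pos (pr.2 + 1) ce.2 fuel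
      if ce.1 ≠ [] then (String.ofList pr.1, (base, pr.2), ce.1) :: rest else rest
    else []

def select_sent (text : String) (pos : List ((Int × Int) × String)) :
    List (String × (Int × Int) × (List ((Int × Int) × String))) :=
  pvSelLoop text.toList pos 0 0 (text.toList.length + 1)

-- ===== PORT B =====
-- phase 1: the sentence spans (text[base:end], base, end)
def pvSpans (s : List Char) (base : Int) :
    Nat → List (List Char × Int × Int)
  | 0 => []
  | fuel+1 =>
    if base < (s.length : Int) then
      let dot := PySem.Chars.findFrom s ['.'] (base + 100)
      let e := if dot = -1 then (s.length : Int) else dot + 1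
      (PySem.List.slice s (some base) (some e), base, e) :: pvSpans s (e + 1) fuel
    else []

-- 'j = i; while j < len(pos) and pos[j][0][0] < e: j += 1'
def pvAdv (pos : List ((Int × Int) × String)) (e : Int) (j : Nat) : Nat :=
  if h : j < pos.length then
    if pos[j].1.1 < e then pvAdv pos e (j + 1) else j
  else j
  termination_by pos.length - j

-- phase 2: sweep the spans with the entity pointer i
def pvAttach (pos : List ((Int × Int) × String)) :
    List (List Char × Int × Int) → Nat → List (String × (Int × Int) × (List ((Int × Int) × String)))
  | [], _ => []
  | sp :: rest, i =>
    let j := pvAdv pos sp.2.2 i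
    let tl := pvAttach pos rest j
    if i < j then
      (String.ofList sp.1, (sp.2.1, sp.2.2), PySem.List.slice pos (some (i : Int)) (some (j : Int))) :: tl
    else tl

def select_sent_alt (text : String) (pos : List ((Int × Int) × String)) :
    List (String × (Int × Int) × (List ((Int × Int) × String))) :=
  pvAttach pos (pvSpans text.toList 0 (text.toList.length + 1)) 0

-- ===== PRECONDITION & SPEC =====
def Spec_select_sent (text : String) (pos : List ((Int × Int) × String)) (out : List (String × (Int × Int) × (List ((Int × Int) × String)))) : Prop := out = select_sent_alt text pos
instance (text : String) (pos : List ((Int × Int) × String)) (out : List (String × (Int × Int) × (List ((Int × Int) × String)))) : Decidable (Spec_select_sent text pos out) := by unfold Spec_select_sent; infer_instance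

-- ===== CLAIM (what is proved, stated in full; the proofs are below) =====
def Claim_equal_select_sent : Prop := ∀ (text : String) (pos : List ((Int × Int) × String)), Dom_select_sent text pos → Spec_select_sent text pos (select_sent text pos)

-- ===== LEMMAS AND PROOFS =====

theorem pv_ff_formula (s sub : List Char) (k : Nat) :
    PySem.Chars.findFrom s sub (k : Int) none =
      if s.length < k then -1
      else if PySem.Chars.find (s.drop k) sub = -1 then -1
      else (k : Int) + PySem.Chars.find (s.drop k) sub := by
  by_cases h : k ≤ s.length
  · rw [PySem.Chars.findFrom_natCast s sub k h]
    simp [Nat.not_lt.mpr h]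
  · have h' : s.length < k := by omega
    simp only [if_pos h']
    simp only [PySem.Chars.findFrom]
    split_ifs <;> first | rfl | omega


theorem pv_find_eq_of (l sub : List Char) (j : Nat) (h1 : sub <+: l.drop j)
    (h2 : ∀ i, i < j → ¬ sub <+: l.drop i) : PySem.Chars.find l sub = (j : Nat) := by
  have hin : sub <:+: l := h1.isInfix.trans (List.drop_suffix j l).isInfix
  have hpos : 0 ≤ PySem.Chars.find l sub := (PySem.Chars.find_nonneg_iff l sub).mpr hin
  obtain ⟨hocc, hmin⟩ := PySem.Chars.find_spec hpos
  have hfj : ¬ (PySem.Chars.find l sub).toNat < j := fun h => h2 _ h hocc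
  have hjf : ¬ j < (PySem.Chars.find l sub).toNat := fun h => hmin j h h1
  omega


theorem pv_isolLoop_eq (t : List Char) (fuel : Nat) : ∀ (m : Nat), m ≤ 100 → m ≤ t.length →
    t.length + 1 - m ≤ fuel →
    pvIsolLoop t (PySem.Chars.findFrom t ['.'] (m : Int) none) fuel =
      (if PySem.Chars.findFrom t ['.'] (100 : Int) none = -1 then ((-1 : Int), some t)
       else (PySem.Chars.findFrom t ['.'] (100 : Int) none, none)) := by
  induction fuel with
  | zero => intro m hm hml hf; omega
  | succ fuel ih =>
    intro m hm hml hf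
    have hc : ((100 : Nat) : Int) = (100 : Int) := by norm_num
    by_cases hd : PySem.Chars.findFrom t ['.'] (m : Int) none = -1
    · have hnin : ¬ ['.'] <:+: t.drop m :=
        (PySem.Chars.findFrom_natCast_eq_neg_one_iff t ['.'] m hml).mp hd
      have hD : PySem.Chars.findFrom t ['.'] (100 : Int) none = -1 := by
        rw [← hc, pv_ff_formula]
        by_cases hl : t.length < 100
        · simp [hl]
        · rw [if_neg hl, if_pos]
          rw [PySem.Chars.find_eq_neg_one_iff]
          intro hin
          exact hnin (hin.trans (by
            have h9 : t.drop 100 = (t.drop m).drop (100 - m) := by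
              rw [List.drop_drop]; congr 1; omega
            rw [h9]
            exact (List.drop_suffix _ _).isInfix))
      rw [hd]
      simp [pvIsolLoop, hD]
    · obtain ⟨hmd, hocc, hmin⟩ := PySem.Chars.findFrom_natCast_spec t ['.'] m hml hd
      set d := PySem.Chars.findFrom t ['.'] (m : Int) none with hdef
      have hlt : d.toNat < t.length := by
        by_contra hge
        have h8 : t.drop d.toNat = [] := by
          apply List.drop_eq_nil_of_le; omega
        rw [h8] at hocc
        simp at hocc
      by_cases h100 : d < 100
      · have hstep : pvIsolLoop t d (fuel + 1) =
            pvIsolLoop t (PySem.Chars.findFrom t ['.'] (d + 1)) fuel := by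
          rw [pvIsolLoop]
          rw [if_pos h100, if_neg hd]
        rw [hstep]
        have e1 : d + 1 = ((d.toNat + 1 : Nat) : Int) := by omega
        rw [e1]
        exact ih (d.toNat + 1) (by omega) (by omega) (by omega)
      · have hDd : PySem.Chars.findFrom t ['.'] (100 : Int) none = d := by
          rw [← hc, pv_ff_formula]
          rw [if_neg (by omega)]
          have hfind : PySem.Chars.find (t.drop 100) ['.'] = ((d.toNat - 100 : Nat) : Int) := by
            apply pv_find_eq_of
            · rw [List.drop_drop]
              have h7 : 100 + (d.toNat - 100) = d.toNat := by omega
              rw [h7]; exact hocc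
            · intro i hi hp
              rw [List.drop_drop] at hp
              exact hmin (100 + i) (by omega) (by omega) hp
          rw [hfind]
          rw [if_neg (by omega)]
          omega
        rw [hDd, if_neg (by omega)]
        rw [pvIsolLoop]
        rw [if_neg h100]


theorem pv_ff_shift (s sub : List Char) (b k : Nat) (hb : b ≤ s.length) :
    PySem.Chars.findFrom s sub ((b : Int) + (k : Int)) none =
      (if PySem.Chars.findFrom (s.drop b) sub (k : Int) none = -1 then -1
       else (b : Int) + PySem.Chars.findFrom (s.drop b) sub (k : Int) none) := by
  have e1 : ((b : Int) + (k : Int)) = ((b + k : Nat) : Int) := by push_cast; ring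
  rw [e1, pv_ff_formula, pv_ff_formula]
  simp only [List.drop_drop, List.length_drop]
  have hge := PySem.Chars.neg_one_le_find (List.drop (b+k) s) sub
  by_cases h1 : s.length < b + k
  · rw [if_pos h1, if_pos (show s.length - b < k by omega)]; simp
  · rw [if_neg h1, if_neg (show ¬(s.length - b < k) by omega)]
    by_cases h2 : PySem.Chars.find (List.drop (b+k) s) sub = -1
    · rw [if_pos h2, if_pos h2]; simp
    · rw [if_neg h2, if_neg h2, if_neg (by omega)]
      push_cast; ring


theorem pv_isolate_eq (s : List Char) (b : Nat) (hb : b < s.length) :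
    pvIsolate (s.drop b) (b : Int) =
      (let dot := PySem.Chars.findFrom s ['.'] ((b : Int) + 100) none
       let e := if dot = -1 then (s.length : Int) else dot + 1
       (PySem.List.slice s (some (b : Int)) (some e), e)) := by
  have hc : ((100 : Nat) : Int) = (100 : Int) := by norm_num
  have hlen : (s.drop b).length = s.length - b := by simp
  have h0 : PySem.Chars.find (s.drop b) ['.'] =
      PySem.Chars.findFrom (s.drop b) ['.'] (((0 : Nat) : Int)) none := by
    simp
  have hshift := pv_ff_shift s ['.'] b 100 (by omega)
  rw [hc] at hshift
  unfold pvIsolate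
  rw [h0, pv_isolLoop_eq (s.drop b) ((s.drop b).length + 2) 0 (by omega) (by omega) (by omega)]
  set D := PySem.Chars.findFrom (s.drop b) ['.'] (100 : Int) none with hDdef
  by_cases hD : D = -1
  · simp only [hD, hshift, if_true]
    have hsl : PySem.List.slice s (some (b : Int)) (some (s.length : Int)) = s.drop b := by
      rw [PySem.List.slice_natCast]
      apply List.take_of_length_le
      simp
    simp only [hsl]
    refine Prod.ext rfl ?_
    simp only [List.length_drop]
    omega
  · -- derive the shape of D from the formula
    have hval := pv_ff_formula (s.drop b) ['.'] 100
    rw [hc, ← hDdef] at hval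
    have hge := PySem.Chars.neg_one_le_find ((s.drop b).drop 100) ['.']
    have hl100 : ¬ (s.drop b).length < 100 := by
      intro h; rw [if_pos h] at hval; exact hD hval
    have hfne : ¬ PySem.Chars.find ((s.drop b).drop 100) ['.'] = -1 := by
      intro h; rw [if_neg hl100, if_pos h] at hval; exact hD hval
    rw [if_neg hl100, if_neg hfne] at hval
    have hfpos : 0 ≤ PySem.Chars.find ((s.drop b).drop 100) ['.'] := by omega
    obtain ⟨hocc, -⟩ := PySem.Chars.find_spec hfpos
    have hocclt : (PySem.Chars.find ((s.drop b).drop 100) ['.']).toNat <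
        ((s.drop b).drop 100).length := by
      by_contra hge2
      rw [List.drop_eq_nil_of_le (by omega)] at hocc
      simp at hocc
    have hDlt : D.toNat < (s.drop b).length := by
      simp only [List.length_drop] at hocclt; omega
    have hD100 : 100 ≤ D := by omega
    simp only [if_neg hD, hshift]
    have he : (if ((b : Int) + D) = -1 then (s.length : Int) else (b : Int) + D + 1)
        = (b : Int) + D + 1 := by rw [if_neg (by omega)]
    simp only [he]
    have hres : PySem.List.slice (s.drop b) none (some (D + 1)) = (s.drop b).take (D.toNat + 1) := by
      rw [PySem.List.slice_to _ (show (0:Int) ≤ D + 1 by omega)]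
      congr 1; omega
    have hsl2 : PySem.List.slice s (some (b : Int)) (some ((b : Int) + D + 1)) =
        (s.drop b).take (D.toNat + 1) := by
      have e2 : (b : Int) + D + 1 = ((b + D.toNat + 1 : Nat) : Int) := by push_cast; omega
      rw [e2, PySem.List.slice_natCast]
      congr 1; omega
    simp only [hres, hsl2]
    refine Prod.ext rfl ?_
    simp only [List.length_take, List.length_drop]
    omega


theorem pv_adv_bounds (pos : List ((Int × Int) × String)) (e : Int) (j : Nat) :
    j ≤ pvAdv pos e j ∧ (pvAdv pos e j ≤ pos.length ∨ pvAdv pos e j = j) := by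
  have H : ∀ k j, pos.length ≤ j + k →
      j ≤ pvAdv pos e j ∧ (pvAdv pos e j ≤ pos.length ∨ pvAdv pos e j = j) := by
    intro k
    induction k with
    | zero => intro j hk; rw [pvAdv.eq_def, dif_neg (by omega)]; omega
    | succ k ihk =>
      intro j hk
      rw [pvAdv.eq_def]
      by_cases h : j < pos.length
      · rw [dif_pos h]
        by_cases hlt : pos[j].1.1 < e
        · rw [if_pos hlt]
          have := ihk (j + 1) (by omega)
          omega
        · rw [if_neg hlt]; omega
      · rw [dif_neg h]; omega
  exact H (pos.length - j + 1) j (by omega)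


theorem pv_collect_eq (pos : List ((Int × Int) × String)) (nbase : Int) (ent : Nat) :
    pvCollect pos nbase ent =
      ((pos.drop ent).take (pvAdv pos nbase ent - ent), pvAdv pos nbase ent) := by
  have H : ∀ k ent, pos.length ≤ ent + k →
      pvCollect pos nbase ent =
        ((pos.drop ent).take (pvAdv pos nbase ent - ent), pvAdv pos nbase ent) := by
    intro k
    induction k with
    | zero =>
      intro ent hk
      rw [pvCollect.eq_def, dif_neg (by omega), pvAdv.eq_def, dif_neg (by omega)]
      simp
    | succ k ihk =>
      intro ent hk
      rw [pvCollect.eq_def, pvAdv.eq_def]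
      by_cases h : ent < pos.length
      · rw [dif_pos h, dif_pos h]
        by_cases hlt : pos[ent].1.1 < nbase
        · rw [if_pos hlt, if_pos hlt]
          rw [ihk (ent + 1) (by omega)]
          obtain ⟨h1, _⟩ := pv_adv_bounds pos nbase (ent + 1)
          refine Prod.ext ?_ rfl
          simp only
          rw [List.drop_eq_getElem_cons h]
          have e1 : pvAdv pos nbase (ent + 1) - ent =
              (pvAdv pos nbase (ent + 1) - (ent + 1)) + 1 := by omega
          rw [e1, List.take_succ_cons]
        · rw [if_neg hlt, if_neg hlt]; simp
      · rw [dif_neg h, dif_neg h]; simp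
  exact H (pos.length - ent + 1) ent (by omega)


theorem pv_main (s : List Char) (pos : List ((Int × Int) × String)) (fuel : Nat) :
    ∀ (base : Int) (ent : Nat), 0 ≤ base →
      pvSelLoop s pos base ent fuel = pvAttach pos (pvSpans s base fuel) ent := by
  induction fuel with
  | zero => intro base ent h0; rfl
  | succ fuel ih =>
    intro base ent h0
    obtain ⟨b, rfl⟩ : ∃ b : Nat, base = (b : Int) := ⟨base.toNat, by omega⟩
    by_cases hb : (b : Int) < (s.length : Int)
    · have hblt : b < s.length := by exact_mod_cast hb
      rw [pvSelLoop, if_pos hb, pvSpans, if_pos hb]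
      simp only
      rw [show PySem.List.slice s (some (b : Int)) none = s.drop b by
        rw [PySem.List.slice_from _ (show (0:Int) ≤ (b:Int) by omega)]; simp]
      rw [pv_isolate_eq s b hblt]
      simp only
      set dot := PySem.Chars.findFrom s ['.'] ((b : Int) + 100) with hdot
      set e := if dot = -1 then (s.length : Int) else dot + 1 with he
      rw [pvAttach]
      simp only
      rw [pv_collect_eq]
      simp only
      obtain ⟨hj1, hj2⟩ := pv_adv_bounds pos e ent
      set j := pvAdv pos e ent with hj
      have he0 : 0 ≤ e := by
        rw [he]; split_ifs with h
        · omega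
        · have := pv_ff_formula s ['.'] (b + 100)
          rw [show (((b + 100 : Nat) : Int)) = (b : Int) + 100 by push_cast; ring] at this
          rw [← hdot] at this
          have hge := PySem.Chars.neg_one_le_find (s.drop (b + 100)) ['.']
          split_ifs at this <;> omega
      rw [ih (e + 1) j (by omega)]
      have hlist : (pos.drop ent).take (j - ent) =
          PySem.List.slice pos (some (ent : Int)) (some (j : Int)) := by
        rw [PySem.List.slice_natCast]
      have hne : ((pos.drop ent).take (j - ent) ≠ [] ↔ ent < j) := by
        rw [← List.length_pos_iff_ne_nil]
        simp only [List.length_take, List.length_drop]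
        omega
      by_cases hcase : ent < j
      · rw [if_pos (hne.mpr hcase), if_pos hcase, hlist]
      · rw [if_neg (by intro hx; exact hcase (hne.mp hx)), if_neg hcase]
    · rw [pvSelLoop, if_neg hb, pvSpans, if_neg hb, pvAttach]

-- ===== VERDICT (by name: the statement is the Claim_ definition above) =====
theorem select_sent_spec : Claim_equal_select_sent := by
  intro text pos _
  unfold Spec_select_sent select_sent select_sent_alt
  exact pv_main text.toList pos (text.toList.length + 1) 0 0 (by omega)
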